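-- pv_equiv track=rewrite | github.com/FoxTold/TiZJO1 | lab9/main.py | swap_decimal
-- ===== SOURCE A (Python) =====
-- def swap_decimal(word):
--     result = ""
--     for i in word:
--         if i == '0':
--             result+='a'
--         elif i == '1':
--             result+= 'b'
--         elif i == '2':
--             result +='c'
--         elif i == '3':
--             result += 'd'
--         elif i == '4':
--             result +='e'
--         elif i == '5':
--             result +='f'
--         elif i=='6':
--             result+='g'
--         elif i=='7':
--             result+='h'
--         elif i=='8':
--             result+='i'
--         elif i=='9':
--             result+='j'
--     return result
-- ===== SOURCE B (Python) =====
-- def swap_decimal(word):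
--     # Stage 1: keep only the ten ASCII digit characters.
--     s = ''.join(c for c in word if c in '0123456789')
--     # Stage 2: ten whole-string replace passes, one per digit (table rewriting).
--     for old, new in zip('0123456789', 'abcdefghij'):
--         s = s.replace(old, new)
--     return s
-- ===== Notes on version B (the rewrite author's own statement) =====
-- stated objective: alternative
-- what changed: Replaces A's single per-character pass with a ten-way if/elif chain by a two-stage pipeline: first filter the string down to its digit characters, then apply ten whole-string replace passes driven by a zipped digit-to-letter table.
import Mathlib
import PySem

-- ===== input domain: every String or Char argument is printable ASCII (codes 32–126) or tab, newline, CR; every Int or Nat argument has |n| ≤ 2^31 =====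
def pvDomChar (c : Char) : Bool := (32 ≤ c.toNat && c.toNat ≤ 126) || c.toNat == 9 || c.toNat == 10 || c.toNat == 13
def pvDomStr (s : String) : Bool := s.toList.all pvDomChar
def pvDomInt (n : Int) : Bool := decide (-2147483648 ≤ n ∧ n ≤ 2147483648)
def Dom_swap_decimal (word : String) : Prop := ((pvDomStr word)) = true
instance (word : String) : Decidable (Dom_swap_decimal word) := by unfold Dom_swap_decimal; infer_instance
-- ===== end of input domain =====

-- B replaces A's single per-character if/elif pass by a two-stage pipeline: filter to digits, then ten whole-string replace passes from a zipped table; objective: alternative.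


-- ===== PORT A =====
-- one iteration of A's loop body: the ten-way if/elif chain appending to result
def swapStepA (acc : List Char) (i : Char) : List Char :=
  if i = '0' then acc ++ ['a']
  else if i = '1' then acc ++ ['b']
  else if i = '2' then acc ++ ['c']
  else if i = '3' then acc ++ ['d']
  else if i = '4' then acc ++ ['e']
  else if i = '5' then acc ++ ['f']
  else if i = '6' then acc ++ ['g']
  else if i = '7' then acc ++ ['h']
  else if i = '8' then acc ++ ['i']
  else if i = '9' then acc ++ ['j']
  else acc

def swap_decimal (word : String) : String :=
  String.ofList (word.toList.foldl swapStepA [])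

-- ===== PORT B =====
-- stage 1: ''.join(c for c in word if c in '0123456789')  ('c in s' is Python's substring test)
-- stage 2: for old, new in zip('0123456789', 'abcdefghij'): s = s.replace(old, new)
def swap_decimal_alt (word : String) : String :=
  let s := word.toList.filter (fun c => PySem.Chars.isIn [c] "0123456789".toList)
  let s' := (List.zip "0123456789".toList "abcdefghij".toList).foldl
      (fun t p => PySem.Chars.replace t [p.1] [p.2]) s
  String.ofList s'

-- ===== PRECONDITION & SPEC =====
def Spec_swap_decimal (word : String) (out : String) : Prop := out = swap_decimal_alt word
instance (word : String) (out : String) : Decidable (Spec_swap_decimal word out) := by unfold Spec_swap_decimal; infer_instance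

-- ===== CLAIM (what is proved, stated in full; the proofs are below) =====
def Claim_equal_swap_decimal : Prop := ∀ (word : String), Dom_swap_decimal word → Spec_swap_decimal word (swap_decimal word)

-- ===== LEMMAS AND PROOFS =====

-- the digit → letter table (value on non-digits irrelevant: they are filtered out)
def tableC (c : Char) : Char :=
  if c = '0' then 'a' else if c = '1' then 'b' else if c = '2' then 'c'
  else if c = '3' then 'd' else if c = '4' then 'e' else if c = '5' then 'f'
  else if c = '6' then 'g' else if c = '7' then 'h' else if c = '8' then 'i'
  else if c = '9' then 'j' else c

theorem swapStepA_eq (acc : List Char) (c : Char) :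
    swapStepA acc c =
      if c ∈ "0123456789".toList then acc ++ [tableC c] else acc := by
  by_cases h0 : c = '0'
  · subst h0; rw [if_pos (by decide)]; simp [swapStepA, tableC]
  by_cases h1 : c = '1'
  · subst h1; rw [if_pos (by decide)]; simp [swapStepA, tableC]
  by_cases h2 : c = '2'
  · subst h2; rw [if_pos (by decide)]; simp [swapStepA, tableC]
  by_cases h3 : c = '3'
  · subst h3; rw [if_pos (by decide)]; simp [swapStepA, tableC]
  by_cases h4 : c = '4'
  · subst h4; rw [if_pos (by decide)]; simp [swapStepA, tableC]
  by_cases h5 : c = '5'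
  · subst h5; rw [if_pos (by decide)]; simp [swapStepA, tableC]
  by_cases h6 : c = '6'
  · subst h6; rw [if_pos (by decide)]; simp [swapStepA, tableC]
  by_cases h7 : c = '7'
  · subst h7; rw [if_pos (by decide)]; simp [swapStepA, tableC]
  by_cases h8 : c = '8'
  · subst h8; rw [if_pos (by decide)]; simp [swapStepA, tableC]
  by_cases h9 : c = '9'
  · subst h9; rw [if_pos (by decide)]; simp [swapStepA, tableC]
  · have hd : c ∉ "0123456789".toList := by
      simp only [show "0123456789".toList = ['0','1','2','3','4','5','6','7','8','9'] from rfl,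
        List.mem_cons, List.not_mem_nil, or_false]
      push Not
      exact ⟨h0, h1, h2, h3, h4, h5, h6, h7, h8, h9⟩
    rw [if_neg hd]
    simp [swapStepA, h0, h1, h2, h3, h4, h5, h6, h7, h8, h9]

-- 'c in "0123456789"' for a single character is list membership
theorem isIn_single (c : Char) (l : List Char) :
    PySem.Chars.isIn [c] l = decide (c ∈ l) := by
  by_cases h : c ∈ l
  · rw [(PySem.Chars.isIn_iff_infix [c] l).mpr ((List.singleton_infix_iff c l).mpr h)]
    simp [h]
  · rw [(PySem.Chars.isIn_eq_false_iff [c] l).mpr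
      (fun hh => h ((List.singleton_infix_iff c l).mp hh))]
    simp [h]

theorem replace_go_single (a b : Char) : ∀ (fuel : Nat) (l acc : List Char),
    l.length ≤ fuel →
    PySem.Chars.replace.go [a] [b] fuel l acc =
      acc.reverse ++ l.map (fun c => if c = a then b else c) := by
  intro fuel
  induction fuel with
  | zero =>
    intro l acc h
    have : l = [] := List.length_eq_zero_iff.mp (Nat.le_zero.mp h)
    subst this
    simp [PySem.Chars.replace.go]
  | succ n ih =>
    intro l acc h
    cases l with
    | nil => simp [PySem.Chars.replace.go]
    | cons c t =>
      simp only [PySem.Chars.replace.go]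
      by_cases hc : c = a
      · subst hc
        have hp : List.isPrefixOf [c] (c :: t) = true := by
          simp [List.isPrefixOf]
        rw [if_pos hp]
        simp only [List.length_cons, List.length_nil, List.drop_succ_cons, List.drop_zero]
        rw [ih t _ (by simpa using Nat.le_of_succ_le_succ h)]
        simp
      · have hp : List.isPrefixOf [a] (c :: t) = false := by
          simp [List.isPrefixOf]
          exact fun hh => hc hh.symm
        rw [if_neg (by simp [hp])]
        rw [ih t _ (by simpa using Nat.le_of_succ_le_succ h)]
        simp [hc]

-- Python's s.replace(a, b) for single characters is a pointwise map
theorem replace_single (a b : Char) (l : List Char) :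
    PySem.Chars.replace l [a] [b] = l.map (fun c => if c = a then b else c) := by
  have h0 : PySem.Chars.replace l [a] [b] = PySem.Chars.replace.go [a] [b] l.length l [] := by
    rw [PySem.Chars.replace]; simp
  rw [h0, replace_go_single a b l.length l [] (le_refl _)]
  simp

theorem swap_decimal_spec : Claim_equal_swap_decimal := by
  intro word _
  show swap_decimal word = swap_decimal_alt word
  unfold swap_decimal swap_decimal_alt
  have hstep : swapStepA = fun acc c =>
      if c ∈ "0123456789".toList then acc ++ [tableC c] else acc := by
    funext acc c; exact swapStepA_eq acc c
  rw [hstep, PySem.List.foldl_append_ite]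
  simp only [isIn_single]
  have hz : List.zip "0123456789".toList "abcdefghij".toList =
      [('0','a'),('1','b'),('2','c'),('3','d'),('4','e'),
       ('5','f'),('6','g'),('7','h'),('8','i'),('9','j')] := rfl
  rw [hz]
  simp only [List.foldl_cons, List.foldl_nil, replace_single, List.map_map]
  refine congrArg String.ofList (List.map_congr_left ?_)
  intro c hc
  have hmem : c ∈ ['0','1','2','3','4','5','6','7','8','9'] := by
    have := (List.mem_filter.mp hc).2
    simpa using this
  simp only [List.mem_cons, List.not_mem_nil, or_false] at hmem
  rcases hmem with rfl|rfl|rfl|rfl|rfl|rfl|rfl|rfl|rfl|rfl <;> rfl
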